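-- pv_equiv track=rewrite | github.com/energistix/adventOfCode | day12/part1.py | compute_size_contiguous_groups
-- ===== SOURCE A (Python) =====
-- def compute_size_contiguous_groups(line: str):
--     res: list[int] = []
--     current = 0
--     for char in line:
--         if char == "#":
--             current += 1
--         elif current != 0:
--             res.append(current)
--             current = 0
--     if current != 0:
--         res.append(current)
--     return res
-- ===== SOURCE B (Python) =====
-- def compute_size_contiguous_groups(line: str):
--     # span-and-skip scan: find each run of '#' as a whole, record its length, jump past it
--     res = []
--     i = 0
--     n = len(line)
--     while i < n:
--         if line[i] != "#":
--             i += 1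
--         else:
--             j = i + 1
--             while j < n and line[j] == "#":
--                 j += 1
--             res.append(j - i)
--             i = j
--     return res
-- ===== Notes on version B (the rewrite author's own statement) =====
-- stated objective: alternative
-- what changed: Replaces A's accumulator-and-flush single pass (counter incremented per char, appended on each run boundary and once after the loop) with a span-and-skip scan that locates each '#'-run as a whole, records j-i, and jumps past it; no pending-counter state or post-loop flush.
import Mathlib
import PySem

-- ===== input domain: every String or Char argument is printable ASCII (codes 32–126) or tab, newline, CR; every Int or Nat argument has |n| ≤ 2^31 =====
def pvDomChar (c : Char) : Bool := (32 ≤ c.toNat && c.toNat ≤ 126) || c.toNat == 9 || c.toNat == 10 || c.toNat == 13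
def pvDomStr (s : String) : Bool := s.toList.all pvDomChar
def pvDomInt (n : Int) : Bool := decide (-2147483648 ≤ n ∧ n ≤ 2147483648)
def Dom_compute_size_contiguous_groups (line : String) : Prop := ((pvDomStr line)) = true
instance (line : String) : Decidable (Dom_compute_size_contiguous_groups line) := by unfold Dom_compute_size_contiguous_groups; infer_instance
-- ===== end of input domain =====

-- B replaces A's accumulator-and-flush loop with a span-and-skip scan over the runs of '#'; alternative, same cost.
-- ===== PORT A =====
-- A's loop: state (res, current); flush current on a non-'#' char and once after the loop.
def aGo : List Char → List Int → Int → List Int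
  | [], res, cur => if cur ≠ 0 then res ++ [cur] else res
  | c :: cs, res, cur =>
    if c = '#' then aGo cs res (cur + 1)
    else if cur ≠ 0 then aGo cs (res ++ [cur]) 0
    else aGo cs res cur

def compute_size_contiguous_groups (line : String) : List Int :=
  aGo line.toList [] 0

-- ===== PORT B =====
-- Source B's outer while: skip a non-'#' char, or take the whole run (inner while = takeWhile) and jump past it (dropWhile).
def bGo : List Char → List Int
  | [] => []
  | c :: cs =>
    if c = '#' then
      (1 + (cs.takeWhile (· = '#')).length : Int) :: bGo (cs.dropWhile (· = '#'))
    else bGo cs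
termination_by l => l.length
decreasing_by
  · exact Nat.lt_succ_of_le (List.length_dropWhile_le _ _)
  · simp

def compute_size_contiguous_groups_alt (line : String) : List Int :=
  bGo line.toList

-- ===== PRECONDITION & SPEC =====
def Spec_compute_size_contiguous_groups (line : String) (out : List Int) : Prop := out = compute_size_contiguous_groups_alt line
instance (line : String) (out : List Int) : Decidable (Spec_compute_size_contiguous_groups line out) := by unfold Spec_compute_size_contiguous_groups; infer_instance

-- ===== CLAIM (what is proved, stated in full; the proofs are below) =====
def Claim_equal_compute_size_contiguous_groups : Prop := ∀ (line : String), Dom_compute_size_contiguous_groups line → Spec_compute_size_contiguous_groups line (compute_size_contiguous_groups line)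

-- ===== LEMMAS AND PROOFS =====

-- ===== VERDICT (by name: the statement is the Claim_ definition above) =====
-- res is only ever appended to: pull it out front.
theorem aGo_res (l : List Char) : ∀ (res : List Int) (cur : Int),
    aGo l res cur = res ++ aGo l [] cur := by
  induction l with
  | nil => intro res cur; simp [aGo]; split <;> simp
  | cons c cs ih =>
    intro res cur
    simp only [aGo]
    split
    · rw [ih res, ih []]
    · split
      · rw [ih (res ++ [cur]), ih ([] ++ [cur])]; simp
      · rw [ih res, ih []]

-- The key invariant: A's loop from counter 0 computes bGo, and from a positive
-- counter it emits cur plus the length of the leading '#'-run, then continues as bGo.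
theorem aGo_bGo (l : List Char) :
    aGo l [] 0 = bGo l ∧
    ∀ cur : Int, 0 < cur →
      aGo l [] cur = (cur + (l.takeWhile (· = '#')).length) :: bGo (l.dropWhile (· = '#')) := by
  induction l with
  | nil =>
    constructor
    · simp [aGo, bGo]
    · intro cur h; simp [aGo, bGo, h.ne']
  | cons c cs ih =>
    by_cases hc : c = '#'
    · constructor
      · rw [show aGo (c :: cs) [] 0 = aGo cs [] 1 by simp [aGo, hc]]
        rw [(ih.2 1 one_pos)]
        simp [bGo, hc]
      · intro cur h
        rw [show aGo (c :: cs) [] cur = aGo cs [] (cur + 1) by simp [aGo, hc]]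
        rw [ih.2 (cur + 1) (by omega)]
        simp [List.takeWhile, List.dropWhile, hc]
        try omega
    · constructor
      · rw [show aGo (c :: cs) [] 0 = aGo cs [] 0 by simp [aGo, hc]]
        rw [ih.1]; simp [bGo, hc]
      · intro cur h
        rw [show aGo (c :: cs) [] cur = aGo cs [cur] 0 by simp [aGo, hc, h.ne']]
        rw [aGo_res, ih.1]
        simp [List.takeWhile, List.dropWhile, hc, bGo]

theorem compute_size_contiguous_groups_spec : Claim_equal_compute_size_contiguous_groups := by
  intro line _
  unfold Spec_compute_size_contiguous_groups compute_size_contiguous_groups compute_size_contiguous_groups_alt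
  exact (aGo_bGo line.toList).1
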